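-- pv_equiv track=rewrite | github.com/SlimSandy/neonzero | src/neonvoid/engine/parser.py | _extract_redirect
-- ===== SOURCE A (Python) =====
-- def _extract_redirect(segment: str) -> tuple[str, str | None]:
--     """Extract > redirect from the end of a command segment.
--
--     Returns (command_part, redirect_file_or_none).
--     """
--     in_single = False
--     in_double = False
--
--     for i, char in enumerate(segment):
--         if char == "'" and not in_double:
--             in_single = not in_single
--         elif char == '"' and not in_single:
--             in_double = not in_double
--         elif char == ">" and not in_single and not in_double:
--             command_part = segment[:i].strip()
--             file_part = segment[i + 1:].strip()
--             # Handle >> (append) - treat as > for simplicity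
--             if file_part.startswith(">"):
--                 file_part = file_part[1:].strip()
--             return command_part, file_part if file_part else None
--
--     return segment, None
-- ===== SOURCE B (Python) =====
-- def _extract_redirect(segment: str) -> tuple:
--     """Extract > redirect from the end of a command segment (quote-skipping scan).
--
--     Returns (command_part, redirect_file_or_none).
--     """
--     i = 0
--     n = len(segment)
--     while i < n:
--         c = segment[i]
--         if c == "'" or c == '"':
--             # jump over the whole quoted region; an unterminated quote
--             # swallows the rest of the string
--             j = segment.find(c, i + 1)
--             if j == -1:
--                 return segment, None
--             i = j + 1
--         elif c == ">":
--             command_part = segment[:i].strip()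
--             file_part = segment[i + 1:].strip()
--             if file_part.startswith(">"):
--                 file_part = file_part[1:].strip()
--             return command_part, file_part if file_part else None
--         else:
--             i += 1
--     return segment, None
-- ===== Notes on version B (the rewrite author's own statement) =====
-- stated objective: alternative
-- what changed: Replaces A's per-character scan with in_single/in_double boolean state by a scan that, on a quote character, jumps directly past the whole quoted region using str.find, so no quote-state flags are maintained.
import Mathlib
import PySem

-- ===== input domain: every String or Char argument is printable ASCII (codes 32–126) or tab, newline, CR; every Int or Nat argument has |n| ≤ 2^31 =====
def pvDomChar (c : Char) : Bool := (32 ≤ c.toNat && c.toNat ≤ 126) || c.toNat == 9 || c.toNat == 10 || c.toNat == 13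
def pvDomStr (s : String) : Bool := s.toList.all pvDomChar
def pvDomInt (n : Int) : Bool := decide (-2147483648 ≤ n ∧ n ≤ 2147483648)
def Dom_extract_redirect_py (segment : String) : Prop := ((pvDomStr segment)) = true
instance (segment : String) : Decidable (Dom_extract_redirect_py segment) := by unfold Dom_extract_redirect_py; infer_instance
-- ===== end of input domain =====

-- B replaces A's per-character quote-state machine by a scan that jumps over whole quoted regions with find (objective: alternative).


-- shared tail: both Pythons compute command_part/file_part identically once the '>' index i is found
def pvEmit (full : List Char) (i : Nat) : String × Option String :=
  let command_part := PySem.Chars.strip (full.take i)          -- segment[:i].strip()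
  let fp0 := PySem.Chars.strip (full.drop (i + 1))             -- segment[i+1:].strip()
  let fp := if PySem.Chars.startswith fp0 ['>'] then PySem.Chars.strip (fp0.drop 1) else fp0
  (String.ofList command_part, if fp = [] then none else some (String.ofList fp))

-- ===== PORT A =====
-- A's loop: enumerate chars with in_single/in_double flags
def pvALoop (full : List Char) : List Char → Nat → Bool → Bool → String × Option String
  | [], _, _, _ => (String.ofList full, none)
  | c :: rest, i, insg, indb =>
    if c = '\'' ∧ ¬ indb = true then pvALoop full rest (i + 1) (!insg) indb
    else if c = '"' ∧ ¬ insg = true then pvALoop full rest (i + 1) insg (!indb)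
    else if c = '>' ∧ ¬ insg = true ∧ ¬ indb = true then pvEmit full i
    else pvALoop full rest (i + 1) insg indb

def extract_redirect_py (segment : String) : String × Option String :=
  pvALoop segment.toList segment.toList 0 false false

-- ===== PORT B =====
-- B's loop: on a quote char find the matching close quote and jump past it
def pvBLoop (full : List Char) : List Char → Nat → String × Option String
  | [], _ => (String.ofList full, none)
  | c :: rest, i =>
    if c = '\'' ∨ c = '"' then
      match h : rest.findIdx? (· = c) with
      | none => (String.ofList full, none)                          -- segment.find(c, i+1) == -1
      | some j => pvBLoop full (rest.drop (j + 1)) (i + j + 2)  -- i = j + 1 (absolute)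
    else if c = '>' then pvEmit full i
    else pvBLoop full rest (i + 1)
termination_by l _ => l.length
decreasing_by
  · simp only [List.length_cons, List.length_drop]; omega
  · simp only [List.length_cons]; omega

def extract_redirect_py_alt (segment : String) : String × Option String :=
  pvBLoop segment.toList segment.toList 0

-- ===== PRECONDITION & SPEC =====
def Spec_extract_redirect_py (segment : String) (out : String × Option String) : Prop := out = extract_redirect_py_alt segment
instance (segment : String) (out : String × Option String) : Decidable (Spec_extract_redirect_py segment out) := by unfold Spec_extract_redirect_py; infer_instance

-- ===== CLAIM (what is proved, stated in full; the proofs are below) =====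
def Claim_equal_extract_redirect_py : Prop := ∀ (segment : String), Dom_extract_redirect_py segment → Spec_extract_redirect_py segment (extract_redirect_py segment)

-- ===== LEMMAS AND PROOFS =====

-- Inside a single-quoted region A ignores everything until the next '\'' :
theorem pvALoop_single (full : List Char) (rest : List Char) :
    ∀ k, pvALoop full rest k true false =
      match rest.findIdx? (· = '\'') with
      | none => (String.ofList full, none)
      | some j => pvALoop full (rest.drop (j + 1)) (k + j + 1) false false := by
  induction rest with
  | nil => intro k; simp [pvALoop, List.findIdx?_nil]
  | cons d ds ih =>
    intro k
    rw [List.findIdx?_cons]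
    by_cases hd : d = '\''
    · simp [pvALoop, hd]
    · have : pvALoop full (d :: ds) k true false = pvALoop full ds (k + 1) true false := by
        simp [pvALoop, hd]
      rw [this, ih (k + 1)]
      simp only [hd, decide_false]
      cases h : ds.findIdx? (· = '\'') with
      | none => simp
      | some j =>
        simp only [Option.map_some, List.drop_succ_cons]
        have : k + 1 + j + 1 = k + (j + 1) + 1 := by omega
        rw [this]
        simp

-- Inside a double-quoted region A ignores everything until the next '"' :
theorem pvALoop_double (full : List Char) (rest : List Char) :
    ∀ k, pvALoop full rest k false true =
      match rest.findIdx? (· = '"') with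
      | none => (String.ofList full, none)
      | some j => pvALoop full (rest.drop (j + 1)) (k + j + 1) false false := by
  induction rest with
  | nil => intro k; simp [pvALoop, List.findIdx?_nil]
  | cons d ds ih =>
    intro k
    rw [List.findIdx?_cons]
    by_cases hd : d = '"'
    · simp [pvALoop, hd]
    · have step : pvALoop full (d :: ds) k false true = pvALoop full ds (k + 1) false true := by
        by_cases hq : d = '\''
        · simp [pvALoop, hq]
        · simp [pvALoop, hq, hd]
      rw [step, ih (k + 1)]
      simp only [hd, decide_false]
      cases h : ds.findIdx? (· = '"') with
      | none => simp
      | some j =>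
        simp only [Option.map_some, List.drop_succ_cons]
        have : k + 1 + j + 1 = k + (j + 1) + 1 := by omega
        rw [this]
        simp

-- Outside quotes the two loops agree:
theorem pvLoop_eq (full : List Char) :
    ∀ l : List Char, ∀ i, pvALoop full l i false false = pvBLoop full l i := by
  intro l
  induction hn : l.length using Nat.strong_induction_on generalizing l with
  | _ n ih =>
  cases l with
  | nil => intro i; simp [pvALoop, pvBLoop]
  | cons c rest =>
    intro i
    by_cases hq : c = '\'' ∨ c = '"'
    · have hskip :
        pvALoop full (c :: rest) i false false =
          match rest.findIdx? (· = c) with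
          | none => (String.ofList full, none)
          | some j => pvALoop full (rest.drop (j + 1)) (i + 1 + j + 1) false false := by
        rcases hq with h | h
        · subst h
          have : pvALoop full ('\'' :: rest) i false false = pvALoop full rest (i + 1) true false := by
            simp [pvALoop]
          rw [this, pvALoop_single]
        · subst h
          have : pvALoop full ('"' :: rest) i false false = pvALoop full rest (i + 1) false true := by
            simp [pvALoop]
          rw [this, pvALoop_double]
      rw [hskip]
      unfold pvBLoop
      simp only [hq, if_true]
      cases h : rest.findIdx? (· = c) with
      | none => simp
      | some j =>
        simp only []
        have hlen : (rest.drop (j + 1)).length < n := by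
          simp only [List.length_cons] at hn
          have := List.length_drop (l := rest) (i := j + 1)
          omega
        have heq : i + 1 + j + 1 = i + j + 2 := by omega
        rw [heq, ih _ hlen _ rfl _]
    · have h1 : c ≠ '\'' := fun h => hq (Or.inl h)
      have h2 : c ≠ '"' := fun h => hq (Or.inr h)
      by_cases hgt : c = '>'
      · subst hgt
        simp [pvALoop, pvBLoop, h1, h2]
      · have ha : pvALoop full (c :: rest) i false false = pvALoop full rest (i + 1) false false := by
          simp [pvALoop, h1, h2, hgt]
        have hb : pvBLoop full (c :: rest) i = pvBLoop full rest (i + 1) := by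
          conv_lhs => rw [pvBLoop.eq_def]
          simp [h1, h2, hgt]
        rw [ha, hb]
        have hlen : rest.length < n := by simp [List.length_cons] at hn; omega
        exact ih _ hlen _ rfl _

-- ===== VERDICT (by name: the statement is the Claim_ definition above) =====
theorem extract_redirect_py_spec : Claim_equal_extract_redirect_py := by
  intro segment _
  unfold Spec_extract_redirect_py extract_redirect_py extract_redirect_py_alt
  exact pvLoop_eq _ _ _
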